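-- pv_equiv track=rewrite | github.com/shubhambhandari29/AFFINITY | services/auth_service.py | _resolve_role_from_groups
-- ===== SOURCE A (Python) =====
-- from typing import Any
--
-- GROUP_ROLE_PRIORITY = {
--     "AZURE_SECURE_ROLE_CLAIMS_PROD_SACAPP_ADMIN": ("Admin", 1),
--     "AZURE_SECURE_ROLE_CLAIMS_PROD_SACAPP_DIRECTORS": ("Director", 2),
--     "AZURE_SECURE_ROLE_CLAIMS_PROD_SACAPP_UNDERWRITERS": ("Underwriter", 3),
--     "AZURE_SECURE_ROLE_CLAIMS_PROD_SACAPP_CCT": ("CCT_User", 4),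
-- }
--
-- def _resolve_role_from_groups(groups: list[dict[str, Any]]) -> str | None:
--     matched: list[tuple[int, str, str]] = []
--     for group in groups:
--         group_name = str(group.get("displayName", "")).strip()
--         role_priority = GROUP_ROLE_PRIORITY.get(group_name)
--         if role_priority:
--             role, priority = role_priority
--             matched.append((priority, group_name, role))
--
--     if not matched:
--         return None
--
--     matched.sort(key=lambda item: item[0])
--     ordered_roles = list(dict.fromkeys(role for _, _, role in matched))
--     return ",".join(ordered_roles)
-- ===== SOURCE B (Python) =====
-- GROUP_ROLE_PRIORITY = {
--     "AZURE_SECURE_ROLE_CLAIMS_PROD_SACAPP_ADMIN": ("Admin", 1),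
--     "AZURE_SECURE_ROLE_CLAIMS_PROD_SACAPP_DIRECTORS": ("Director", 2),
--     "AZURE_SECURE_ROLE_CLAIMS_PROD_SACAPP_UNDERWRITERS": ("Underwriter", 3),
--     "AZURE_SECURE_ROLE_CLAIMS_PROD_SACAPP_CCT": ("CCT_User", 4),
-- }
--
-- def _resolve_role_from_groups(groups):
--     present = {str(group.get("displayName", "")).strip() for group in groups}
--     roles = [role for name, (role, _prio) in GROUP_ROLE_PRIORITY.items() if name in present]
--     return ",".join(roles) if roles else None
-- ===== Notes on version B (the rewrite author's own statement) =====
-- stated objective: simpler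
-- what changed: Replaces A's collect-matches/sort-by-priority/ordered-dedup pipeline with a set of stripped displayNames and a single walk over the fixed priority table (whose insertion order is ascending priority), so no sort and no dedup are needed.
import Mathlib
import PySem

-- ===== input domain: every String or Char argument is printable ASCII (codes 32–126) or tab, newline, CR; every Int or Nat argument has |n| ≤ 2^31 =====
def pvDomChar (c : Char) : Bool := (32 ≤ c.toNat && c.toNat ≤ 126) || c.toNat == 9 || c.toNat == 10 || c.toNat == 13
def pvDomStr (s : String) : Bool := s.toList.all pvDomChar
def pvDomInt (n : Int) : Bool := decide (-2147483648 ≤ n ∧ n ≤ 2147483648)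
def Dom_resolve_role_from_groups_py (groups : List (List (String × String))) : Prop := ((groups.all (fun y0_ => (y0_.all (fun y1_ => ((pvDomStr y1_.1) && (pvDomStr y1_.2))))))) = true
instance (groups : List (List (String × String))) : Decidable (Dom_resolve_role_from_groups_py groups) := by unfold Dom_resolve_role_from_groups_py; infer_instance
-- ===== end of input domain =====

-- B replaces A's collect/sort/dedup pipeline by a membership set plus one walk over the
-- fixed priority table (whose insertion order is ascending priority); objective: simpler.

-- ===== PORT A =====
def pvGroupRolePriority : PySem.Dict String (String × Int) := PySem.Dict.mk
  [("AZURE_SECURE_ROLE_CLAIMS_PROD_SACAPP_ADMIN", ("Admin", 1)),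
   ("AZURE_SECURE_ROLE_CLAIMS_PROD_SACAPP_DIRECTORS", ("Director", 2)),
   ("AZURE_SECURE_ROLE_CLAIMS_PROD_SACAPP_UNDERWRITERS", ("Underwriter", 3)),
   ("AZURE_SECURE_ROLE_CLAIMS_PROD_SACAPP_CCT", ("CCT_User", 4))]

def resolve_role_from_groups_py (groups : List (List (String × String))) : Option String :=
  let matched : List (Int × String × String) := groups.foldl (fun matched group =>
    let group_name := PySem.Str.strip ((PySem.Dict.mk group).getD "displayName" "")
    match pvGroupRolePriority.get? group_name with
    | some (role, priority) => matched ++ [(priority, group_name, role)]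
    | none => matched) []
  if matched = [] then none
  else
    let sortedMatched := PySem.List.sorted matched (fun item => item.1) false
    let ordered_roles := PySem.List.dedup (sortedMatched.map (fun t => t.2.2))
    some (PySem.Str.join "," ordered_roles)

-- ===== PORT B =====
def pvGroupRolePriorityB : List (String × String × Int) :=
  [("AZURE_SECURE_ROLE_CLAIMS_PROD_SACAPP_ADMIN", ("Admin", 1)),
   ("AZURE_SECURE_ROLE_CLAIMS_PROD_SACAPP_DIRECTORS", ("Director", 2)),
   ("AZURE_SECURE_ROLE_CLAIMS_PROD_SACAPP_UNDERWRITERS", ("Underwriter", 3)),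
   ("AZURE_SECURE_ROLE_CLAIMS_PROD_SACAPP_CCT", ("CCT_User", 4))]

def resolve_role_from_groups_py_alt (groups : List (List (String × String))) : Option String :=
  let present : PySem.Set String := PySem.Set.ofList
    (groups.map (fun group => PySem.Str.strip ((PySem.Dict.mk group).getD "displayName" "")))
  let roles := pvGroupRolePriorityB.filterMap
    (fun kv => if PySem.Set.contains present kv.1 then some kv.2.1 else none)
  if roles = [] then none else some (PySem.Str.join "," roles)

-- ===== PRECONDITION & SPEC =====
def Spec_resolve_role_from_groups_py (groups : List (List (String × String))) (out : Option String) : Prop := out = resolve_role_from_groups_py_alt groups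
instance (groups : List (List (String × String))) (out : Option String) : Decidable (Spec_resolve_role_from_groups_py groups out) := by unfold Spec_resolve_role_from_groups_py; infer_instance

-- ===== CLAIM (what is proved, stated in full; the proofs are below) =====
def Claim_equal_resolve_role_from_groups_py : Prop := ∀ (groups : List (List (String × String))), Dom_resolve_role_from_groups_py groups → Spec_resolve_role_from_groups_py groups (resolve_role_from_groups_py groups)

-- ===== LEMMAS AND PROOFS =====
def pvK1 : String := "AZURE_SECURE_ROLE_CLAIMS_PROD_SACAPP_ADMIN"
def pvK2 : String := "AZURE_SECURE_ROLE_CLAIMS_PROD_SACAPP_DIRECTORS"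
def pvK3 : String := "AZURE_SECURE_ROLE_CLAIMS_PROD_SACAPP_UNDERWRITERS"
def pvK4 : String := "AZURE_SECURE_ROLE_CLAIMS_PROD_SACAPP_CCT"
def pvT1 : Int × String × String := (1, pvK1, "Admin")
def pvT2 : Int × String × String := (2, pvK2, "Director")
def pvT3 : Int × String × String := (3, pvK3, "Underwriter")
def pvT4 : Int × String × String := (4, pvK4, "CCT_User")
def pvF (n : String) : Option (Int × String × String) :=
  match pvGroupRolePriority.get? n with
  | some (role, priority) => some (priority, n, role)
  | none => none
lemma pvF_eq (n : String) : pvF n =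
    if pvK1 = n then some pvT1 else if pvK2 = n then some pvT2
    else if pvK3 = n then some pvT3 else if pvK4 = n then some pvT4 else none := by
  simp only [pvF, pvGroupRolePriority, PySem.Dict.get?_mk_cons, beq_iff_eq, pvK1, pvK2, pvK3, pvK4]
  split_ifs with h1 h2 h3 h4 <;> simp [pvT1, pvT2, pvT3, pvT4, pvK1, pvK2, pvK3, pvK4, *, PySem.Dict.get?]
def pvBlock (c1 c2 c3 c4 : Nat) : List (Int × String × String) :=
  List.replicate c1 pvT1 ++ (List.replicate c2 pvT2 ++ (List.replicate c3 pvT3 ++ List.replicate c4 pvT4))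
def pvBef (a b : Int × String × String) : Bool := decide (a.1 < b.1)
lemma insertBy_skip (x a : Int × String × String) (h : pvBef x a = false)
    (n : Nat) (rest : List (Int × String × String)) :
    PySem.List.insertBy pvBef x (List.replicate n a ++ rest)
      = List.replicate n a ++ PySem.List.insertBy pvBef x rest := by
  induction n with
  | zero => simp
  | succ m ih => simp [List.replicate_succ, PySem.List.insertBy, h, ih]
lemma insertBy_front (x : Int × String × String) (l : List (Int × String × String))
    (h : ∀ y ∈ l, pvBef x y = true) :
    PySem.List.insertBy pvBef x l = x :: l := by
  cases l with
  | nil => simp [PySem.List.insertBy]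
  | cons y ys => simp [PySem.List.insertBy, h y (by simp)]
lemma pvIns1 (c1 c2 c3 c4 : Nat) :
    PySem.List.insertBy pvBef pvT1 (pvBlock c1 c2 c3 c4) = pvBlock (c1+1) c2 c3 c4 := by
  unfold pvBlock
  rw [insertBy_skip _ _ (by decide), insertBy_front]
  · simp [List.replicate_succ']
  · intro y hy
    simp only [List.mem_append, List.mem_replicate] at hy
    rcases hy with ⟨_, rfl⟩ | ⟨_, rfl⟩ | ⟨_, rfl⟩ <;> decide
lemma pvIns2 (c1 c2 c3 c4 : Nat) :
    PySem.List.insertBy pvBef pvT2 (pvBlock c1 c2 c3 c4) = pvBlock c1 (c2+1) c3 c4 := by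
  unfold pvBlock
  rw [insertBy_skip _ _ (by decide), insertBy_skip _ _ (by decide), insertBy_front]
  · simp [List.replicate_succ']
  · intro y hy
    simp only [List.mem_append, List.mem_replicate] at hy
    rcases hy with ⟨_, rfl⟩ | ⟨_, rfl⟩ <;> decide
lemma pvIns3 (c1 c2 c3 c4 : Nat) :
    PySem.List.insertBy pvBef pvT3 (pvBlock c1 c2 c3 c4) = pvBlock c1 c2 (c3+1) c4 := by
  unfold pvBlock
  rw [insertBy_skip _ _ (by decide), insertBy_skip _ _ (by decide), insertBy_skip _ _ (by decide),
    insertBy_front]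
  · simp [List.replicate_succ']
  · intro y hy
    simp only [List.mem_replicate] at hy
    rcases hy with ⟨_, rfl⟩; decide
lemma pvIns4 (c1 c2 c3 c4 : Nat) :
    PySem.List.insertBy pvBef pvT4 (pvBlock c1 c2 c3 c4) = pvBlock c1 c2 c3 (c4+1) := by
  unfold pvBlock
  rw [insertBy_skip _ _ (by decide), insertBy_skip _ _ (by decide), insertBy_skip _ _ (by decide),
    show List.replicate c4 pvT4 = List.replicate c4 pvT4 ++ [] from (List.append_nil _).symm,
    insertBy_skip _ _ (by decide)]
  simp [PySem.List.insertBy, List.replicate_succ']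
lemma sorted_append_singleton (xs : List (Int × String × String)) (x : Int × String × String) :
    PySem.List.sorted (xs ++ [x]) (fun item => item.1) false
      = PySem.List.insertBy pvBef x (PySem.List.sorted xs (fun item => item.1) false) := by
  rw [PySem.List.sorted_eq_foldl_insertBy, PySem.List.sorted_eq_foldl_insertBy, List.foldl_append]
  rfl
lemma pvSorted_block (names : List String) :
    PySem.List.sorted (names.filterMap pvF) (fun item => item.1) false
      = pvBlock (names.count pvK1) (names.count pvK2) (names.count pvK3) (names.count pvK4) := by
  induction names using List.reverseRecOn with
  | nil => simp [PySem.List.sorted_eq_foldl_insertBy, pvBlock]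
  | append_singleton names n ih =>
    rw [List.filterMap_append]
    simp only [List.filterMap_cons, List.filterMap_nil]
    rw [pvF_eq n]
    have hcnt : ∀ k : String, (names ++ [n]).count k = names.count k + (if k = n then 1 else 0) := by
      intro k
      by_cases h : k = n
      · subst h; simp [List.count_append]
      · simp [List.count_append, h, Ne.symm h]
    split_ifs with h1 h2 h3 h4
    · rw [sorted_append_singleton, ih, pvIns1]; subst h1; simp only [hcnt]; simp [pvK1, pvK2, pvK3, pvK4]
    · rw [sorted_append_singleton, ih, pvIns2]; subst h2; simp only [hcnt]; simp [pvK1, pvK2, pvK3, pvK4]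
    · rw [sorted_append_singleton, ih, pvIns3]; subst h3; simp only [hcnt]; simp [pvK1, pvK2, pvK3, pvK4]
    · rw [sorted_append_singleton, ih, pvIns4]; subst h4; simp only [hcnt]; simp [pvK1, pvK2, pvK3, pvK4]
    · rw [List.append_nil, ih]
      simp only [hcnt, if_neg h1, if_neg h2, if_neg h3, if_neg h4, Nat.add_zero]
lemma foldl_add_replicate (n : Nat) (x : String) (s : PySem.Set String) :
    List.foldl PySem.Set.add s (List.replicate n x)
      = if n = 0 then s else PySem.Set.add s x := by
  induction n generalizing s with
  | zero => simp
  | succ m ih =>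
    rw [List.replicate_succ, List.foldl_cons, ih]
    by_cases hm : m = 0
    · simp [hm]
    · simp [hm]
lemma pvDedup_roles (c1 c2 c3 c4 : Nat) :
    PySem.List.dedup ((pvBlock c1 c2 c3 c4).map (fun t => t.2.2))
      = (let s1 := if c1 = 0 then [] else PySem.Set.add [] "Admin"
         let s2 := if c2 = 0 then s1 else PySem.Set.add s1 "Director"
         let s3 := if c3 = 0 then s2 else PySem.Set.add s2 "Underwriter"
         if c4 = 0 then s3 else PySem.Set.add s3 "CCT_User") := by
  rw [PySem.List.dedup_eq_ofList, PySem.Set.ofList_eq_foldl]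
  simp only [pvBlock, List.map_append, List.map_replicate, List.foldl_append, pvT1, pvT2, pvT3, pvT4]
  simp only [foldl_add_replicate]
lemma pvMain (names : List String) :
    (if names.filterMap pvF = [] then (none : Option String)
     else some (PySem.Str.join "," (PySem.List.dedup
       ((PySem.List.sorted (names.filterMap pvF) (fun item => item.1) false).map (fun t => t.2.2)))))
    = (if pvGroupRolePriorityB.filterMap (fun kv => if PySem.Set.contains (PySem.Set.ofList names) kv.1 then some kv.2.1 else none) = [] then none
       else some (PySem.Str.join "," (pvGroupRolePriorityB.filterMap (fun kv => if PySem.Set.contains (PySem.Set.ofList names) kv.1 then some kv.2.1 else none)))) := by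
  have hnil : names.filterMap pvF = [] ↔
      (names.count pvK1 = 0 ∧ names.count pvK2 = 0 ∧ names.count pvK3 = 0 ∧ names.count pvK4 = 0) := by
    rw [← PySem.List.sorted_eq_nil_iff (names.filterMap pvF) (fun item => item.1) false, pvSorted_block]
    simp [pvBlock]
  rw [pvSorted_block, pvDedup_roles]
  simp only [pvGroupRolePriorityB, List.filterMap_cons, List.filterMap_nil]
  by_cases h1 : "AZURE_SECURE_ROLE_CLAIMS_PROD_SACAPP_ADMIN" ∈ names <;>
    by_cases h2 : "AZURE_SECURE_ROLE_CLAIMS_PROD_SACAPP_DIRECTORS" ∈ names <;>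
    by_cases h3 : "AZURE_SECURE_ROLE_CLAIMS_PROD_SACAPP_UNDERWRITERS" ∈ names <;>
    by_cases h4 : "AZURE_SECURE_ROLE_CLAIMS_PROD_SACAPP_CCT" ∈ names <;>
    simp [hnil, List.count_eq_zero, h1, h2, h3, h4, pvK1, pvK2, pvK3, pvK4,
      PySem.Set.add, PySem.Set.contains]
lemma pvMatched_eq (groups : List (List (String × String)))
    (acc : List (Int × String × String)) :
    groups.foldl (fun matched group =>
      match pvGroupRolePriority.get? (PySem.Str.strip ((PySem.Dict.mk group).getD "displayName" "")) with
      | some (role, priority) => matched ++ [(priority, PySem.Str.strip ((PySem.Dict.mk group).getD "displayName" ""), role)]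
      | none => matched) acc
      = acc ++ (groups.map (fun group => PySem.Str.strip ((PySem.Dict.mk group).getD "displayName" ""))).filterMap pvF := by
  induction groups generalizing acc with
  | nil => simp
  | cons g gs ih =>
    simp only [List.foldl_cons, List.map_cons, List.filterMap_cons]
    cases h : pvGroupRolePriority.get? (PySem.Str.strip ((PySem.Dict.mk g).getD "displayName" "")) with
    | none =>
      simp only [pvF, h]
      rw [ih]
      rfl
    | some rp =>
      obtain ⟨r, p⟩ := rp
      simp only [pvF, h]
      rw [ih, List.append_assoc, List.singleton_append]
      rfl

-- ===== VERDICT (by name: the statement is the Claim_ definition above) =====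
theorem resolve_role_from_groups_py_spec : Claim_equal_resolve_role_from_groups_py := by
  intro groups _
  show resolve_role_from_groups_py groups = resolve_role_from_groups_py_alt groups
  simp only [resolve_role_from_groups_py, resolve_role_from_groups_py_alt]
  rw [pvMatched_eq groups [], List.nil_append]
  exact pvMain (groups.map (fun group => PySem.Str.strip ((PySem.Dict.mk group).getD "displayName" "")))
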